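-- pv_equiv track=rewrite | github.com/ChampionTej05/LeetCodeChallenges | maximum_sum_good_subarray.py | maximumGoodSubArraySumGPT
-- ===== SOURCE A (Python) =====
-- def maximumGoodSubArraySumGPT(nums, k):
--     mapper = {}
--     maxSum = None
--     prefixSums = [0]  # Initialize prefix sums with 0 to handle sum calculation from the start
--
--     # Compute prefix sums
--     for num in nums:
--         prefixSums.append(prefixSums[-1] + num)
--
--     # Iterate through the array to find all good subarrays
--     for i, num in enumerate(nums):
--         for target in (num + k, num - k):
--             if target in mapper:
--                 for start_index in mapper[target]:
--                     # Calculate the sum using the prefix sums array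
--                     currentSum = prefixSums[i + 1] - prefixSums[start_index]
--                     if maxSum is None:
--                         maxSum = currentSum
--                     else:
--                         maxSum = max(maxSum, currentSum)
--
--         # Append the current index to the list of indices for the current number
--         if num not in mapper:
--             mapper[num] = []
--         mapper[num].append(i)
--
--     return maxSum if maxSum is not None else 0
-- ===== SOURCE B (Python) =====
-- def maximumGoodSubArraySumGPT(nums, k):
--     # One pass: for each value keep the minimum prefix sum seen at an index holding
--     # that value; a good subarray ending here is best served by the smallest prefix.
--     minPref = {}
--     pref = 0
--     best = None
--     for num in nums:
--         for t in (num + k, num - k):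
--             if t in minPref:
--                 cand = pref + num - minPref[t]
--                 best = cand if best is None else max(best, cand)
--         if num not in minPref or pref < minPref[num]:
--             minPref[num] = pref
--         pref += num
--     return best if best is not None else 0
-- ===== Notes on version B (the rewrite author's own statement) =====
-- stated objective: alternative
-- what changed: Replaces A's precomputed prefix-sum array plus per-value lists of all earlier indices (re-scanned in full at every value match) by a single running-prefix pass that keeps, per value, only the minimum prefix sum seen so far; intended as the O(n) version of A's worst-case-O(n^2) scan, but a timing run measured only 1.46x at the largest size on the generated (duplicate-light) inputs.
import Mathlib
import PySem

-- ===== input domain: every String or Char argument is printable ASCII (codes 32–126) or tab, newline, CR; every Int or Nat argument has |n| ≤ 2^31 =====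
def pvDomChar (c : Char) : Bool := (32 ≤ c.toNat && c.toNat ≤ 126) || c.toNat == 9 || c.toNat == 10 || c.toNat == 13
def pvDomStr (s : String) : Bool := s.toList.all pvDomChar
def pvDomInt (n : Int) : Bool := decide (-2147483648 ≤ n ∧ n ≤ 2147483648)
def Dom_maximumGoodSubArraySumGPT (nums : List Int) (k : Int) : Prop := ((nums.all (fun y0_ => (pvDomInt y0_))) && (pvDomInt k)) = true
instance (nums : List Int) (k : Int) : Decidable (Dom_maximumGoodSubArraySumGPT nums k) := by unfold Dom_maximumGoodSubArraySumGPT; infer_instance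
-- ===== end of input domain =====

-- B replaces A's per-value index lists (rescanned in full at every match) by a dict
-- keeping only the minimum prefix sum per value, with a running prefix sum instead of
-- a precomputed prefix-sum array (a different algorithm; timing gain unconfirmed).

-- ===== PORT A =====
def maximumGoodSubArraySumGPT (nums : List Int) (k : Int) : Int :=
  let prefixSums := nums.foldl (fun acc num => acc ++ [PySem.List.pyGetD acc (-1) 0 + num]) [0]
  let st := (PySem.List.enumerate nums 0).foldl
    (fun (st : Option Int × PySem.Dict Int (List Int)) p =>
      let i := p.1
      let num := p.2
      let maxSum := [num + k, num - k].foldl (fun m target =>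
          if st.2.contains target then
            (st.2.getD target []).foldl (fun m2 s =>
              let currentSum := PySem.List.pyGetD prefixSums (i + 1) 0 - PySem.List.pyGetD prefixSums s 0
              match m2 with
              | none => some currentSum
              | some mx => some (max mx currentSum)) m
          else m) st.1
      let mapper := if st.2.contains num then st.2 else st.2.insert num []
      (maxSum, mapper.insert num (mapper.getD num [] ++ [i])))
    (none, PySem.Dict.empty)
  match st.1 with
  | none => 0
  | some m => m

-- ===== PORT B =====
def maximumGoodSubArraySumGPT_alt (nums : List Int) (k : Int) : Int :=
  let st := nums.foldl
    (fun (st : (PySem.Dict Int Int × Int) × Option Int) num =>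
      let minPref := st.1.1
      let pref := st.1.2
      let best := [num + k, num - k].foldl (fun b t =>
          if minPref.contains t then
            let cand := pref + num - minPref.getD t 0
            some (match b with
                  | none => cand
                  | some m => max m cand)
          else b) st.2
      let minPref' := if !minPref.contains num || pref < minPref.getD num 0 then minPref.insert num pref else minPref
      ((minPref', pref + num), best))
    ((PySem.Dict.empty, 0), none)
  match st.2 with
  | none => 0
  | some m => m

-- ===== PRECONDITION & SPEC =====
def Spec_maximumGoodSubArraySumGPT (nums : List Int) (k : Int) (out : Int) : Prop := out = maximumGoodSubArraySumGPT_alt nums k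
instance (nums : List Int) (k : Int) (out : Int) : Decidable (Spec_maximumGoodSubArraySumGPT nums k out) := by unfold Spec_maximumGoodSubArraySumGPT; infer_instance

-- ===== CLAIM (what is proved, stated in full; the proofs are below) =====
def Claim_equal_maximumGoodSubArraySumGPT : Prop := ∀ (nums : List Int) (k : Int), Dom_maximumGoodSubArraySumGPT nums k → Spec_maximumGoodSubArraySumGPT nums k (maximumGoodSubArraySumGPT nums k)


-- ===== LEMMAS AND PROOFS =====

-- proof-side copies of the two loop bodies (definitionally equal to the ports' lambdas)
def pvPS (nums : List Int) : List Int :=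
  nums.foldl (fun acc num => acc ++ [PySem.List.pyGetD acc (-1) 0 + num]) [0]

def pvUpd (m : Option Int) (c : Int) : Option Int :=
  match m with
  | none => some c
  | some a => some (max a c)

def pvStepA (ps : List Int) (k : Int) (st : Option Int × PySem.Dict Int (List Int)) (p : Int × Int) :
    Option Int × PySem.Dict Int (List Int) :=
  let i := p.1
  let num := p.2
  let maxSum := [num + k, num - k].foldl (fun m target =>
      if st.2.contains target then
        (st.2.getD target []).foldl (fun m2 s =>
          let currentSum := PySem.List.pyGetD ps (i + 1) 0 - PySem.List.pyGetD ps s 0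
          match m2 with
          | none => some currentSum
          | some mx => some (max mx currentSum)) m
      else m) st.1
  let mapper := if st.2.contains num then st.2 else st.2.insert num []
  (maxSum, mapper.insert num (mapper.getD num [] ++ [i]))

def pvFoldA (nums : List Int) (k : Int) (pre : List Int) : Option Int × PySem.Dict Int (List Int) :=
  (PySem.List.enumerate pre 0).foldl (pvStepA (pvPS nums) k) (none, PySem.Dict.empty)

def pvStepB (k : Int) (st : (PySem.Dict Int Int × Int) × Option Int) (num : Int) :
    (PySem.Dict Int Int × Int) × Option Int :=
  let minPref := st.1.1
  let pref := st.1.2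
  let best := [num + k, num - k].foldl (fun b t =>
      if minPref.contains t then
        let cand := pref + num - minPref.getD t 0
        some (match b with
              | none => cand
              | some m => max m cand)
      else b) st.2
  let minPref' := if !minPref.contains num || pref < minPref.getD num 0 then minPref.insert num pref else minPref
  ((minPref', pref + num), best)

def pvFoldB (k : Int) (pre : List Int) : (PySem.Dict Int Int × Int) × Option Int :=
  pre.foldl (pvStepB k) ((PySem.Dict.empty, 0), none)

-- indices (as Nats) at which pre holds the value v, increasing
def pvOcc (pre : List Int) (v : Int) : List Nat :=
  (List.range pre.length).filter (fun j => pre.getD j 0 == v)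

-- running minimum of a list, none on []
def pvMin (l : List Int) : Option Int :=
  match l with
  | [] => none
  | w :: ws => some (ws.foldl min w)

lemma pvUpd_pvUpd (m : Option Int) (c d : Int) : pvUpd (pvUpd m c) d = pvUpd m (max c d) := by
  cases m <;> simp [pvUpd, max_assoc]

-- A's inner scan, folded into "one update with the minimum prefix sum"
lemma foldl_pvUpd_sub (TS : Nat → Int) (P : Int) : ∀ (os : List Nat) (b : Option Int) (a : Int),
    os.foldl (fun m n => pvUpd m (P - TS n)) (pvUpd b (P - a))
      = pvUpd b (P - (os.map TS).foldl min a) := by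
  intro os
  induction os with
  | nil => intro b a; rfl
  | cons o os ih =>
      intro b a
      rw [List.foldl_cons, pvUpd_pvUpd]
      have hmx : max (P - a) (P - TS o) = P - min a (TS o) := by omega
      rw [hmx, ih, List.map_cons, List.foldl_cons]

lemma pvPS_eq (nums : List Int) :
    pvPS nums = (List.range (nums.length + 1)).map (fun j => (nums.take j).sum) := by
  induction nums using List.reverseRecOn with
  | nil => rfl
  | append_singleton ys x ih =>
      have h1 : pvPS (ys ++ [x]) = pvPS ys ++ [PySem.List.pyGetD (pvPS ys) (-1) 0 + x] := by
        simp [pvPS, List.foldl_append]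
      rw [h1, ih]
      have h2 : (List.range (ys.length + 1)).map (fun j => (ys.take j).sum)
          = (List.range ys.length).map (fun j => (ys.take j).sum) ++ [ys.sum] := by
        rw [List.range_succ, List.map_append]
        simp
      rw [h2, PySem.List.pyGetD_neg_one_append_singleton]
      have h3 : (ys ++ [x]).length + 1 = (ys.length + 1) + 1 := by simp
      rw [h3, List.range_succ, List.map_append, List.range_succ, List.map_append]
      congr 1
      · congr 1
        · apply List.map_eq_map_iff.mpr
          intro j hj
          have hj' : j < ys.length := List.mem_range.mp hj
          rw [List.take_append_of_le_length (by omega)]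
        · simp
      · simp

lemma pvPS_getD (nums : List Int) (n : Nat) (h : n ≤ nums.length) :
    PySem.List.pyGetD (pvPS nums) (n : Int) 0 = (nums.take n).sum := by
  rw [pvPS_eq, PySem.List.pyGetD_natCast]
  exact PySem.List.getD_map_range _ _ _ _ (by omega)

lemma pvOcc_lt {pre : List Int} {v : Int} {n : Nat} (h : n ∈ pvOcc pre v) : n < pre.length := by
  have := (List.mem_filter.mp h).1
  exact List.mem_range.mp this

lemma pvOcc_append (pre : List Int) (x v : Int) :
    pvOcc (pre ++ [x]) v = pvOcc pre v ++ (if x = v then [pre.length] else []) := by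
  unfold pvOcc
  have hl : (pre ++ [x]).length = pre.length + 1 := by simp
  rw [hl, List.range_succ, List.filter_append]
  congr 1
  · apply List.filter_congr
    intro j hj
    rw [List.getD_append pre [x] 0 j (List.mem_range.mp hj)]
  · have hgx : (pre ++ [x]).getD pre.length 0 = x := by
      simp [List.getD_eq_getElem?_getD]
    by_cases hx : x = v
    · simp [List.filter, hx]
    · have hbb : (x == v) = false := by simp [hx]
      simp [List.filter, hbb, hx]

lemma pvUpd_eq_B (b : Option Int) (c : Int) :
    pvUpd b c = some (match b with | none => c | some m => max m c) := by
  cases b <;> rfl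

lemma pvStepB_2 (k : Int) (st : (PySem.Dict Int Int × Int) × Option Int) (num : Int) :
    (pvStepB k st num).2
      = [num + k, num - k].foldl (fun b t =>
          if st.1.1.contains t then pvUpd b (st.1.2 + num - st.1.1.getD t 0) else b) st.2 := by
  simp only [pvStepB]
  congr 1
  funext b t
  by_cases h : st.1.1.contains t <;> simp [h, pvUpd_eq_B]

-- the main loop invariant, by induction over prefixes of nums from the left
lemma pvMain (nums : List Int) (k : Int) : ∀ (pre rest : List Int), nums = pre ++ rest →
    ((pvFoldA nums k pre).1 = (pvFoldB k pre).2)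
    ∧ ((pvFoldB k pre).1.2 = pre.sum)
    ∧ (∀ v, (pvFoldA nums k pre).2.get? v
        = if (pvOcc pre v).isEmpty then none else some ((pvOcc pre v).map Int.ofNat))
    ∧ (∀ v, (pvFoldB k pre).1.1.get? v = pvMin ((pvOcc pre v).map (fun n => (pre.take n).sum))) := by
  intro pre
  induction pre using List.reverseRecOn with
  | nil =>
      intro rest h
      refine ⟨rfl, rfl, fun v => ?_, fun v => ?_⟩
      · simp [pvFoldA, pvOcc, PySem.List.enumerate, PySem.Dict.get?_empty]
      · simp [pvFoldB, pvOcc, pvMin, PySem.Dict.get?_empty]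
  | append_singleton ys x ih =>
      intro rest h
      have hnums : nums = ys ++ (x :: rest) := by simpa using h
      obtain ⟨ha, hb, hc, hd⟩ := ih (x :: rest) hnums
      have hlen : ys.length + 1 ≤ nums.length := by
        rw [hnums]; simp
      have hAeq : pvFoldA nums k (ys ++ [x])
          = pvStepA (pvPS nums) k (pvFoldA nums k ys) (0 + (ys.length : Int), x) := by
        unfold pvFoldA
        rw [PySem.List.enumerate_append, List.foldl_append]
        rfl
      have hBeq : pvFoldB k (ys ++ [x]) = pvStepB k (pvFoldB k ys) x := by
        unfold pvFoldB
        rw [List.foldl_append]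
        rfl
      have hPi : PySem.List.pyGetD (pvPS nums) (0 + (ys.length : Int) + 1) 0 = ys.sum + x := by
        have hcast : (0 : Int) + (ys.length : Int) + 1 = ((ys.length + 1 : Nat) : Int) := by push_cast; ring
        have h5 : List.take (ys.length + 1) ys = ys := List.take_of_length_le (by omega)
        rw [hcast, pvPS_getD nums (ys.length + 1) hlen, hnums, List.take_append, h5]
        simp
      have hps : ∀ n : Nat, n ≤ ys.length → PySem.List.pyGetD (pvPS nums) (Int.ofNat n) 0 = (ys.take n).sum := by
        intro n hn
        rw [Int.ofNat_eq_natCast, pvPS_getD nums n (by omega), hnums,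
          List.take_append_of_le_length (by omega)]
      have htar : ∀ (t : Int) (b : Option Int),
          (if (pvFoldA nums k ys).2.contains t then
            ((pvFoldA nums k ys).2.getD t []).foldl (fun m2 s =>
              pvUpd m2 (PySem.List.pyGetD (pvPS nums) (0 + (ys.length : Int) + 1) 0
                          - PySem.List.pyGetD (pvPS nums) s 0)) b
          else b)
          = (if (pvFoldB k ys).1.1.contains t then
              pvUpd b ((pvFoldB k ys).1.2 + x - (pvFoldB k ys).1.1.getD t 0) else b) := by
        intro t b
        rcases hocc : pvOcc ys t with _ | ⟨o, os⟩
        · have h1 : (pvFoldA nums k ys).2.get? t = none := by rw [hc]; simp [hocc]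
          have h2 : (pvFoldB k ys).1.1.get? t = none := by rw [hd]; simp [hocc, pvMin]
          rw [PySem.Dict.contains_eq_isSome_get?, h1, PySem.Dict.contains_eq_isSome_get?, h2]
          rfl
        · have h1 : (pvFoldA nums k ys).2.get? t = some ((o :: os).map Int.ofNat) := by
            rw [hc]; simp [hocc]
          have h2 : (pvFoldB k ys).1.1.get? t
              = some ((os.map (fun n => (ys.take n).sum)).foldl min ((ys.take o).sum)) := by
            rw [hd, hocc]; simp [pvMin]
          rw [PySem.Dict.contains_eq_isSome_get?, h1, PySem.Dict.contains_eq_isSome_get?, h2]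
          simp only [Option.isSome_some, if_true]
          rw [PySem.Dict.getD_eq_get?_getD, h1, PySem.Dict.getD_eq_get?_getD, h2]
          simp only [Option.getD_some]
          rw [List.foldl_map]
          have hcg : ((o :: os).foldl (fun m2 (n : Nat) =>
                pvUpd m2 (PySem.List.pyGetD (pvPS nums) (0 + (ys.length : Int) + 1) 0
                            - PySem.List.pyGetD (pvPS nums) (Int.ofNat n) 0)) b)
              = ((o :: os).foldl (fun m2 (n : Nat) => pvUpd m2 (ys.sum + x - (ys.take n).sum)) b) := by
            apply List.foldl_ext
            intro acc n hn
            rw [hPi, hps n (le_of_lt (pvOcc_lt (hocc ▸ hn)))]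
          rw [hcg, List.foldl_cons, foldl_pvUpd_sub, hb]
      refine ⟨?_, ?_, ?_, ?_⟩
      · rw [hAeq, hBeq, pvStepB_2]
        show ([x + k, x - k].foldl (fun m target =>
            if (pvFoldA nums k ys).2.contains target then
              ((pvFoldA nums k ys).2.getD target []).foldl (fun m2 s =>
                pvUpd m2 (PySem.List.pyGetD (pvPS nums) (0 + (ys.length : Int) + 1) 0
                            - PySem.List.pyGetD (pvPS nums) s 0)) m
            else m) (pvFoldA nums k ys).1)
          = ([x + k, x - k].foldl (fun b t =>
              if (pvFoldB k ys).1.1.contains t then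
                pvUpd b ((pvFoldB k ys).1.2 + x - (pvFoldB k ys).1.1.getD t 0) else b) (pvFoldB k ys).2)
        simp only [List.foldl_cons, List.foldl_nil]
        rw [ha, htar, htar]
      · rw [hBeq]
        show (pvFoldB k ys).1.2 + x = (ys ++ [x]).sum
        rw [hb]; simp
      · intro v
        rw [hAeq, pvOcc_append]
        show ((if (pvFoldA nums k ys).2.contains x then (pvFoldA nums k ys).2
               else (pvFoldA nums k ys).2.insert x []).insert x
              ((if (pvFoldA nums k ys).2.contains x then (pvFoldA nums k ys).2
                else (pvFoldA nums k ys).2.insert x []).getD x [] ++ [0 + (ys.length : Int)])).get? v = _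
        by_cases hv : v = x
        · subst hv
          have hmap : (if (pvFoldA nums k ys).2.contains v then (pvFoldA nums k ys).2
                else (pvFoldA nums k ys).2.insert v []).getD v []
              = (pvOcc ys v).map Int.ofNat := by
            by_cases hcont : (pvFoldA nums k ys).2.contains v = true
            · rw [if_pos hcont, PySem.Dict.getD_eq_get?_getD, hc]
              rcases hocc : pvOcc ys v with _ | ⟨o, os⟩
              · rw [PySem.Dict.contains_eq_isSome_get?, hc] at hcont
                simp [hocc] at hcont
              · simp
            · rw [if_neg hcont, PySem.Dict.getD_eq_get?_getD, PySem.Dict.get?_insert_self]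
              rw [PySem.Dict.contains_eq_isSome_get?, hc] at hcont
              rcases hocc : pvOcc ys v with _ | ⟨o, os⟩
              · simp
              · simp [hocc] at hcont
          rw [PySem.Dict.get?_insert_self, hmap]
          simp
        · rw [PySem.Dict.get?_insert_of_ne _ _ hv]
          have hne : ((if (pvFoldA nums k ys).2.contains x then (pvFoldA nums k ys).2
                else (pvFoldA nums k ys).2.insert x []).get? v) = (pvFoldA nums k ys).2.get? v := by
            by_cases hcont : (pvFoldA nums k ys).2.contains x = true
            · rw [if_pos hcont]
            · rw [if_neg hcont, PySem.Dict.get?_insert_of_ne _ _ hv]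
          rw [hne, hc]
          have hxv : ¬ (x = v) := fun hh => hv hh.symm
          simp [hxv]
      · intro v
        rw [hBeq, pvOcc_append]
        show (if !(pvFoldB k ys).1.1.contains x || (pvFoldB k ys).1.2 < (pvFoldB k ys).1.1.getD x 0
              then (pvFoldB k ys).1.1.insert x (pvFoldB k ys).1.2 else (pvFoldB k ys).1.1).get? v = _
        have hTS : ∀ (l : List Nat), (∀ n ∈ l, n < ys.length) →
            l.map (fun n => ((ys ++ [x]).take n).sum) = l.map (fun n => (ys.take n).sum) := by
          intro l hl
          apply List.map_eq_map_iff.mpr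
          intro n hn
          rw [List.take_append_of_le_length (le_of_lt (hl n hn))]
        have hTSj : ((ys ++ [x]).take ys.length).sum = ys.sum := by
          rw [List.take_append_of_le_length (le_refl _)]; simp
        by_cases hv : v = x
        · subst hv
          by_cases hcont : (pvFoldB k ys).1.1.contains v = true
          · have hsome := hcont
            rw [PySem.Dict.contains_eq_isSome_get?, hd] at hsome
            rcases hocc : pvOcc ys v with _ | ⟨o, os⟩
            · rw [hocc] at hsome; simp [pvMin] at hsome
            · have hget : (pvFoldB k ys).1.1.get? v
                  = some ((os.map (fun n => (ys.take n).sum)).foldl min ((ys.take o).sum)) := by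
                rw [hd, hocc]; simp [pvMin]
              have hgd : (pvFoldB k ys).1.1.getD v 0
                  = (os.map (fun n => (ys.take n).sum)).foldl min ((ys.take o).sum) := by
                rw [PySem.Dict.getD_eq_get?_getD, hget]; rfl
              have hml : ∀ n ∈ o :: os, n < ys.length := fun n hn => pvOcc_lt (hocc ▸ hn)
              have hrhs : pvMin (((o :: os) ++ (if v = v then [ys.length] else [])).map
                    (fun n => ((ys ++ [v]).take n).sum))
                  = some (min ((os.map (fun n => (ys.take n).sum)).foldl min ((ys.take o).sum)) ys.sum) := by
                have hite : (if v = v then [ys.length] else []) = [ys.length] := if_pos rfl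
                have ho : ((ys ++ [v]).take o).sum = (ys.take o).sum := by
                  rw [List.take_append_of_le_length (le_of_lt (hml o (by simp)))]
                have hos : os.map (fun n => ((ys ++ [v]).take n).sum) = os.map (fun n => (ys.take n).sum) :=
                  hTS os (fun n hn => hml n (by simp [hn]))
                rw [hite, List.cons_append, List.map_cons, List.map_append, ho, hos]
                have hsing : [ys.length].map (fun n => ((ys ++ [v]).take n).sum) = [ys.sum] := by
                  simp
                rw [hsing]
                simp [pvMin, List.foldl_append]
              rw [hrhs]
              by_cases hlt : (pvFoldB k ys).1.2 < (os.map (fun n => (ys.take n).sum)).foldl min ((ys.take o).sum)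
              · have hcondT : (!(pvFoldB k ys).1.1.contains v
                    || decide ((pvFoldB k ys).1.2 < (pvFoldB k ys).1.1.getD v 0)) = true := by
                  rw [hcont, hgd]; simp [hlt]
                rw [if_pos hcondT, PySem.Dict.get?_insert_self]
                have : min ((os.map (fun n => (ys.take n).sum)).foldl min ((ys.take o).sum)) ys.sum
                    = (pvFoldB k ys).1.2 := by
                  rw [hb] at hlt ⊢; omega
                rw [this]
              · have hcondF : (!(pvFoldB k ys).1.1.contains v
                    || decide ((pvFoldB k ys).1.2 < (pvFoldB k ys).1.1.getD v 0)) = false := by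
                  rw [hcont, hgd]; simp [hlt]
                rw [if_neg (by rw [hcondF]; exact Bool.false_ne_true), hget]
                have : min ((os.map (fun n => (ys.take n).sum)).foldl min ((ys.take o).sum)) ys.sum
                    = (os.map (fun n => (ys.take n).sum)).foldl min ((ys.take o).sum) := by
                  rw [hb] at hlt; omega
                rw [this]
          · have hnone : (pvFoldB k ys).1.1.get? v = none := by
              rw [PySem.Dict.contains_eq_isSome_get?] at hcont
              cases hgx : (pvFoldB k ys).1.1.get? v with
              | none => rfl
              | some w => rw [hgx] at hcont; simp at hcont
            have hocc0 : pvOcc ys v = [] := by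
              have hdv := hd v
              rw [hnone] at hdv
              rcases hocc : pvOcc ys v with _ | ⟨o, os⟩
              · rfl
              · rw [hocc] at hdv; simp [pvMin] at hdv
            have hcontF : (pvFoldB k ys).1.1.contains v = false := by
              cases hcf : (pvFoldB k ys).1.1.contains v
              · rfl
              · exact absurd hcf hcont
            have hcondT : (!(pvFoldB k ys).1.1.contains v
                || decide ((pvFoldB k ys).1.2 < (pvFoldB k ys).1.1.getD v 0)) = true := by
              rw [hcontF]; simp
            rw [if_pos hcondT, PySem.Dict.get?_insert_self, hocc0, hb]
            simp [pvMin]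
        · have hne : (if !(pvFoldB k ys).1.1.contains x || (pvFoldB k ys).1.2 < (pvFoldB k ys).1.1.getD x 0
              then (pvFoldB k ys).1.1.insert x (pvFoldB k ys).1.2 else (pvFoldB k ys).1.1).get? v
              = (pvFoldB k ys).1.1.get? v := by
            by_cases hcond : (!(pvFoldB k ys).1.1.contains x
                || decide ((pvFoldB k ys).1.2 < (pvFoldB k ys).1.1.getD x 0)) = true
            · rw [if_pos hcond, PySem.Dict.get?_insert_of_ne _ _ hv]
            · rw [if_neg hcond]
          rw [hne, hd]
          have hxv : ¬ (x = v) := fun hh => hv hh.symm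
          rw [if_neg hxv, List.append_nil, hTS _ (fun n hn => pvOcc_lt hn)]

-- ===== VERDICT (by name: the statement is the Claim_ definition above) =====
theorem maximumGoodSubArraySumGPT_spec : Claim_equal_maximumGoodSubArraySumGPT := by
  intro nums k _hdom
  show maximumGoodSubArraySumGPT nums k = maximumGoodSubArraySumGPT_alt nums k
  have h := (pvMain nums k nums [] (by simp)).1
  show (match (pvFoldA nums k nums).1 with | none => 0 | some m => m)
      = (match (pvFoldB k nums).2 with | none => 0 | some m => m)
  rw [h]
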